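-- pv_equiv track=rewrite | github.com/uchicago-library/ocr_converters | src/build-ia-bookreader-ocr.py | get_spacing_coords
-- ===== SOURCE A (Python) =====
-- def get_spacing_coords(spacing, w):
--     offset_l = 0
--     s = 0
--     while s < w * 2:
--         offset_l = offset_l + spacing[s]
--         s = s + 1
--
--     offset_r = 0
--     s = 0
--     while s <= w * 2:
--         offset_r = offset_r + spacing[s]
--         s = s + 1
--
--     return (offset_l, offset_r)
-- ===== SOURCE B (Python) =====
-- def get_spacing_coords(spacing, w):
--     # Single pass: one running total; record the prefix sum just before the
--     # final term as offset_l, the full total (including spacing[2*w]) is offset_r.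
--     t = w * 2
--     offset_l = 0
--     total = 0
--     s = 0
--     while s <= t:
--         if s == t:
--             offset_l = total
--         total = total + spacing[s]
--         s = s + 1
--     return (offset_l, total)
-- ===== Notes on version B (the rewrite author's own statement) =====
-- stated objective: simpler
-- what changed: Replaces A's two separate scans over the same prefix with one scan maintaining a single running sum, recording offset_l just before the final term is added.
import Mathlib
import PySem

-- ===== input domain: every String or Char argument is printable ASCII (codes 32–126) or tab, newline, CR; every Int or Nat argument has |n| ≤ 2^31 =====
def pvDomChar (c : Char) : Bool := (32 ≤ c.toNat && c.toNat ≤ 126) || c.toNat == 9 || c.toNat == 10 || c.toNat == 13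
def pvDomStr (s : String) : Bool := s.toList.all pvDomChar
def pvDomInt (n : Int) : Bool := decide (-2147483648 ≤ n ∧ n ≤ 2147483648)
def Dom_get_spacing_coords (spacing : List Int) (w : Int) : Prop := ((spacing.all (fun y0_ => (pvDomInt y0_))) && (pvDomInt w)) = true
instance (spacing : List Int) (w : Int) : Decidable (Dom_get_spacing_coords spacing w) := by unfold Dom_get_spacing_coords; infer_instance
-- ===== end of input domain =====

-- B replaces A's two scans of the same prefix with a single pass keeping one running sum
-- (offset_l recorded just before the final term); return value equivalence is proved on
-- Pre_ (no IndexError).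

-- ===== PORT A =====
-- A's first while loop: while s < bound: acc += spacing[s]; s += 1.
-- fuel is only a totality device (one unit per iteration, chosen large enough);
-- spacing[s] is in range for every admitted input (Pre_ excludes IndexError), so getD 0 is exact there.
def pvLoopLt (spacing : List Int) (bound : Int) : Nat → Int → Int → Int
  | 0, _, acc => acc
  | n + 1, s, acc =>
    if s < bound then pvLoopLt spacing bound n (s + 1) (acc + (PySem.List.pyGet? spacing s).getD 0)
    else acc

-- A's second while loop: while s <= bound: acc += spacing[s]; s += 1.
def pvLoopLe (spacing : List Int) (bound : Int) : Nat → Int → Int → Int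
  | 0, _, acc => acc
  | n + 1, s, acc =>
    if s ≤ bound then pvLoopLe spacing bound n (s + 1) (acc + (PySem.List.pyGet? spacing s).getD 0)
    else acc

def get_spacing_coords (spacing : List Int) (w : Int) : Int × Int :=
  (pvLoopLt spacing (w * 2) ((w * 2).toNat + 1) 0 0,
   pvLoopLe spacing (w * 2) ((w * 2).toNat + 1) 0 0)

-- ===== PORT B =====
-- B's single while loop carrying (offset_l, total); fuel as above.
def pvLoopB (spacing : List Int) (t : Int) : Nat → Int → Int → Int → Int × Int
  | 0, _, ol, total => (ol, total)
  | n + 1, s, ol, total =>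
    if s ≤ t then
      pvLoopB spacing t n (s + 1) (if s = t then total else ol)
        (total + (PySem.List.pyGet? spacing s).getD 0)
    else (ol, total)

def get_spacing_coords_alt (spacing : List Int) (w : Int) : Int × Int :=
  pvLoopB spacing (w * 2) ((w * 2).toNat + 1) 0 0 0

-- ===== PRECONDITION & SPEC =====
-- Pre_ excludes exactly the inputs where Python A raises IndexError: w ≥ 0 with spacing shorter than 2*w+1.
def Pre_get_spacing_coords (spacing : List Int) (w : Int) : Prop := w * 2 < (spacing.length : Int)
instance (spacing : List Int) (w : Int) : Decidable (Pre_get_spacing_coords spacing w) := by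
  unfold Pre_get_spacing_coords; infer_instance

def pvWitness_get_spacing_coords : List Int × Int := ([3, 1, 4, 1, 5], 2)

def Spec_get_spacing_coords (spacing : List Int) (w : Int) (out : Int × Int) : Prop := out = get_spacing_coords_alt spacing w
instance (spacing : List Int) (w : Int) (out : Int × Int) : Decidable (Spec_get_spacing_coords spacing w out) := by unfold Spec_get_spacing_coords; infer_instance

-- ===== CLAIM (what is proved, stated in full; the proofs are below) =====
def Claim_equal_get_spacing_coords : Prop := ∀ (spacing : List Int) (w : Int), Dom_get_spacing_coords spacing w → Pre_get_spacing_coords spacing w → Spec_get_spacing_coords spacing w (get_spacing_coords spacing w)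

-- ===== LEMMAS AND PROOFS =====

-- Invariant: with enough fuel, B's one-pass loop computes
-- (the <-loop's value while s has not passed t, else ol; the ≤-loop's value).
theorem pvLoopB_eq (spacing : List Int) (t : Int) :
    ∀ (n : Nat) (s ol total : Int), (t + 1 - s).toNat ≤ n →
      pvLoopB spacing t n s ol total =
        ((if s ≤ t then pvLoopLt spacing t n s total else ol),
         pvLoopLe spacing t n s total) := by
  intro n
  induction n with
  | zero =>
    intro s ol total hn
    have hs : ¬ s ≤ t := by omega
    simp [pvLoopB, pvLoopLe, hs]
  | succ n ih =>
    intro s ol total hn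
    by_cases hs : s ≤ t
    · rw [pvLoopB, if_pos hs, ih _ _ _ (by omega)]
      rw [pvLoopLe, if_pos hs]
      by_cases hst : s = t
      · subst hst
        rw [if_neg (show ¬ s + 1 ≤ s by omega), if_pos rfl, if_pos (le_refl s)]
        rw [pvLoopLt, if_neg (lt_irrefl s)]
      · have hlt : s < t := lt_of_le_of_ne hs hst
        rw [if_pos (show s + 1 ≤ t by omega), if_pos hs]
        conv_rhs => rw [pvLoopLt]
        rw [if_pos hlt]
    · rw [pvLoopB, if_neg hs, if_neg hs]
      rw [pvLoopLe, if_neg hs]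

-- ===== VERDICT (by name: the statement is the Claim_ definition above) =====
theorem get_spacing_coords_spec : Claim_equal_get_spacing_coords := by
  intro spacing w _ _
  unfold Spec_get_spacing_coords get_spacing_coords get_spacing_coords_alt
  rw [pvLoopB_eq spacing (w * 2) _ 0 0 0 (by omega)]
  by_cases h : (0 : Int) ≤ w * 2
  · rw [if_pos h]
  · rw [if_neg h, pvLoopLt, if_neg (by omega)]
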